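-- pv_equiv track=rewrite | github.com/moki/aoc2015 | day/day_01/solution.py | part_2
-- ===== SOURCE A (Python) =====
-- def part_2(input):
--     counter = 0
--     floor = 0
--
--     for c in input:
--         counter = counter + 1
--
--         floor += 1 if c == '(' else -1 if c == ')' else 0
--
--         if floor == -1:
--             break
--
--     return counter
-- ===== SOURCE B (Python) =====
-- from itertools import accumulate
--
-- def part_2(input):
--     deltas = [1 if c == '(' else -1 if c == ')' else 0 for c in input]
--     prefixes = list(accumulate(deltas))
--     try:
--         return prefixes.index(-1) + 1
--     except ValueError:
--         return len(input)
-- ===== Notes on version B (the rewrite author's own statement) =====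
-- stated objective: alternative
-- what changed: Replaces A's fused scan-with-early-break by two passes: materialize all running prefix sums with itertools.accumulate, then look up the first -1 with list.index, defaulting to len(input) when absent.
import Mathlib
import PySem

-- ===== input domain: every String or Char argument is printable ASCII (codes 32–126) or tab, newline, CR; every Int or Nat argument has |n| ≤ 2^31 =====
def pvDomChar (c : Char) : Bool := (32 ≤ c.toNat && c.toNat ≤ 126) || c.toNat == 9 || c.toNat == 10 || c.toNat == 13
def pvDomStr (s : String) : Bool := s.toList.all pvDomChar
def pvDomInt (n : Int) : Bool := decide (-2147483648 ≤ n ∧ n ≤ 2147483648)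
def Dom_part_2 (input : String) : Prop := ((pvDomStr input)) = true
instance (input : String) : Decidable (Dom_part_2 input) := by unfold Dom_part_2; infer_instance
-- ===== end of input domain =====

-- Header: B replaces A's fused scan-with-early-break by a materialized prefix-sum list followed by a separate index lookup (alternative decomposition, same cost).


-- ===== PORT A =====
-- A's loop: counter and floor carried, break when floor hits -1
def part2Loop : List Char → Int → Int → Int
  | [], counter, _ => counter
  | c :: cs, counter, floor =>
    let counter := counter + 1
    let floor := floor + (if c = '(' then 1 else if c = ')' then -1 else 0)
    if floor = -1 then counter else part2Loop cs counter floor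

def part_2 (input : String) : Int := part2Loop input.toList 0 0

-- ===== PORT B =====
def pvDelta (c : Char) : Int := if c = '(' then 1 else if c = ')' then -1 else 0

-- itertools.accumulate: running sums starting from acc (initial value not included)
def pvAccum : List Int → Int → List Int
  | [], _ => []
  | d :: ds, acc => (acc + d) :: pvAccum ds (acc + d)

def part_2_alt (input : String) : Int :=
  let deltas := input.toList.map pvDelta
  let prefixes := pvAccum deltas 0
  match PySem.List.index? prefixes (-1) with
  | some i => (i : Int) + 1
  | none => (input.toList.length : Int)

-- ===== PRECONDITION & SPEC =====
def Spec_part_2 (input : String) (out : Int) : Prop := out = part_2_alt input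
instance (input : String) (out : Int) : Decidable (Spec_part_2 input out) := by unfold Spec_part_2; infer_instance

-- ===== CLAIM (what is proved, stated in full; the proofs are below) =====
def Claim_equal_part_2 : Prop := ∀ (input : String), Dom_part_2 input → Spec_part_2 input (part_2 input)

-- ===== LEMMAS AND PROOFS =====
theorem part2Loop_eq (cs : List Char) : ∀ (counter floor : Int),
    part2Loop cs counter floor =
      match PySem.List.index? (pvAccum (cs.map pvDelta) floor) (-1) with
      | some i => counter + (i : Int) + 1
      | none => counter + (cs.length : Int) := by
  induction cs with
  | nil => intro counter floor; simp [part2Loop, pvAccum, PySem.List.index?]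
  | cons c cs ih =>
    intro counter floor
    simp only [List.map, pvAccum, part2Loop, pvDelta]
    by_cases h : (floor + if c = '(' then (1:Int) else if c = ')' then -1 else 0) = -1
    · rw [if_pos h, h, PySem.List.index?_cons_self]; simp
    · rw [if_neg h, PySem.List.index?_cons_of_ne _ h, ih]
      simp only [PySem.List.index?_eq_idxOf?]
      generalize List.idxOf? (-1) (pvAccum (List.map pvDelta cs) (floor + if c = '(' then (1:Int) else if c = ')' then -1 else 0)) = r
      cases r <;> simp <;> ring

-- ===== VERDICT (by name: the statement is the Claim_ definition above) =====
theorem part_2_spec : Claim_equal_part_2 := by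
  intro input _
  unfold Spec_part_2 part_2 part_2_alt
  rw [part2Loop_eq]
  cases h : PySem.List.index? (pvAccum (input.toList.map pvDelta) 0) (-1) <;>
    rw [PySem.List.index?_eq_idxOf?] at h <;> simp [h]
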